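-- pv_equiv track=rewrite | github.com/lastingParadox/ff-site | archive-to-markdown/md-to-json.py | get_character_from_player
-- ===== SOURCE A (Python) =====
-- def get_character_from_player(player, episode_number):
--
--     match player:
--         case "Zander":
--             name_obj = {"1": "Emmett"}
--         case "Silas":
--             name_obj = {"1": "Laav", "13": "KYL300"}
--         case "Trey":
--             name_obj = {"1": "Garrick"}
--         case "Sean":
--             name_obj = {"1": "Seth"}
--         case "Brody":
--             name_obj = {"1": "Serpile", "5": "Bail", "7": "Ibraxas", "11": "Sanya"}
--         case "Maxwell":
--             name_obj = {"1": "Matthias", "15": "Matieu"}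
--         case "Josh":
--             name_obj = {"1": "Jacob"}
--         case "Jonas":
--             name_obj = {"1": "Asier", "13": "Chomsky"}
--         case "TheBlade":
--             name_obj = {"1": "Jim"}
--         case "Arky":
--             name_obj = {"1": "Lucian"}
--         case "Mica":
--             name_obj = {"1": "Maia"}
--         case "Tom Thompson":
--             name_obj = {"1": "Mickey Mouse's Ghost"}
--         case "Finna Steel Christmas":
--             name_obj = {"1": "Steely"}
--         case "Nick":
--             name_obj = {"1": "Lodas"}
--         case "Rashidi":
--             name_obj = {"1": "Danny"}
--         case "Lili":
--             name_obj = {"1": "Iris"}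
--         case "Bill":
--             name_obj = {"1": "Hector"}
--         case _:
--             name_obj = {"1": None}
--
--     episode_numbers = [int(ep) for ep in name_obj.keys()]
--     episode_numbers.sort()
--
--     for index, ep in enumerate(episode_numbers):
--         if ep == int(episode_number):
--             return name_obj[str(ep)]
--         if ep > int(episode_number):
--             if index - 1 < 0:
--                 return name_obj[str(episode_numbers[index])]
--             else:
--                 return name_obj[str(episode_numbers[index - 1])]
--     return name_obj[str(episode_numbers[-1])]
-- ===== SOURCE B (Python) =====
-- _CHARACTERS = {
--     "Zander": {"1": "Emmett"},
--     "Silas": {"1": "Laav", "13": "KYL300"},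
--     "Trey": {"1": "Garrick"},
--     "Sean": {"1": "Seth"},
--     "Brody": {"1": "Serpile", "5": "Bail", "7": "Ibraxas", "11": "Sanya"},
--     "Maxwell": {"1": "Matthias", "15": "Matieu"},
--     "Josh": {"1": "Jacob"},
--     "Jonas": {"1": "Asier", "13": "Chomsky"},
--     "TheBlade": {"1": "Jim"},
--     "Arky": {"1": "Lucian"},
--     "Mica": {"1": "Maia"},
--     "Tom Thompson": {"1": "Mickey Mouse's Ghost"},
--     "Finna Steel Christmas": {"1": "Steely"},
--     "Nick": {"1": "Lodas"},
--     "Rashidi": {"1": "Danny"},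
--     "Lili": {"1": "Iris"},
--     "Bill": {"1": "Hector"},
-- }
--
--
-- def get_character_from_player(player, episode_number):
--     name_obj = _CHARACTERS.get(player, {"1": None})
--     eps = [int(k) for k in name_obj]
--     cands = [e for e in eps if e <= int(episode_number)]
--     key = max(cands) if cands else min(eps)
--     return name_obj[str(key)]
-- ===== Notes on version B (the rewrite author's own statement) =====
-- stated objective: simpler
-- what changed: B drops A's sort-then-indexed-scan (enumerate with index-1 back-reference and end-of-loop fallback) and instead picks the key directly as the max of the keys <= episode_number, falling back to the min key, then does one dict lookup.
import Mathlib
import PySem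

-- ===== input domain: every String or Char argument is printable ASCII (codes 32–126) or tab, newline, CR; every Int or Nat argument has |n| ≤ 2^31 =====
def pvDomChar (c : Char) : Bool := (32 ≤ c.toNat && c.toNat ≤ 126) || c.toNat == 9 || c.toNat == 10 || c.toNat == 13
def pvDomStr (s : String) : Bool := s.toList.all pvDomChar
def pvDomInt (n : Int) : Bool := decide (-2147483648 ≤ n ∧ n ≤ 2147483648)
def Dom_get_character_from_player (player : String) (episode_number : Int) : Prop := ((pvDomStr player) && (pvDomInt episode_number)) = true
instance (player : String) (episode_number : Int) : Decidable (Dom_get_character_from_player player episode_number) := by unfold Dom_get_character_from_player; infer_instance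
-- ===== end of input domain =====

-- B replaces A's sort-plus-indexed-scan selection by a filtered max with a min fallback (simpler, no sort).

-- ===== PORT A =====
-- Python's `match player` on string literals is a sequential equality test: ported as an if-chain.
def pvNameObjA (player : String) : PySem.Dict String (Option String) :=
  if player == "Zander" then PySem.Dict.ofList [("1", some "Emmett")]
  else if player == "Silas" then PySem.Dict.ofList [("1", some "Laav"), ("13", some "KYL300")]
  else if player == "Trey" then PySem.Dict.ofList [("1", some "Garrick")]
  else if player == "Sean" then PySem.Dict.ofList [("1", some "Seth")]
  else if player == "Brody" then PySem.Dict.ofList [("1", some "Serpile"), ("5", some "Bail"), ("7", some "Ibraxas"), ("11", some "Sanya")]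
  else if player == "Maxwell" then PySem.Dict.ofList [("1", some "Matthias"), ("15", some "Matieu")]
  else if player == "Josh" then PySem.Dict.ofList [("1", some "Jacob")]
  else if player == "Jonas" then PySem.Dict.ofList [("1", some "Asier"), ("13", some "Chomsky")]
  else if player == "TheBlade" then PySem.Dict.ofList [("1", some "Jim")]
  else if player == "Arky" then PySem.Dict.ofList [("1", some "Lucian")]
  else if player == "Mica" then PySem.Dict.ofList [("1", some "Maia")]
  else if player == "Tom Thompson" then PySem.Dict.ofList [("1", some "Mickey Mouse's Ghost")]
  else if player == "Finna Steel Christmas" then PySem.Dict.ofList [("1", some "Steely")]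
  else if player == "Nick" then PySem.Dict.ofList [("1", some "Lodas")]
  else if player == "Rashidi" then PySem.Dict.ofList [("1", some "Danny")]
  else if player == "Lili" then PySem.Dict.ofList [("1", some "Iris")]
  else if player == "Bill" then PySem.Dict.ofList [("1", some "Hector")]
  else PySem.Dict.ofList [("1", none)]

-- the `for index, ep in enumerate(episode_numbers)` loop with its three returns
def pvLoopA (d : PySem.Dict String (Option String)) (eps : List Int) (n : Int) :
    Nat → List Int → Option String
  | _, [] =>
    -- `return name_obj[str(episode_numbers[-1])]` (eps never empty here; keys are numeric literals)
    match PySem.List.pyGet? eps (-1) with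
    | some ep => d.getD (PySem.Int.toStr ep) none
    | none => none
  | index, ep :: rest =>
    if ep = n then d.getD (PySem.Int.toStr ep) none
    else if ep > n then
      if (index : Int) - 1 < 0 then
        match PySem.List.pyGet? eps (index : Int) with
        | some e => d.getD (PySem.Int.toStr e) none
        | none => none
      else
        match PySem.List.pyGet? eps ((index : Int) - 1) with
        | some e => d.getD (PySem.Int.toStr e) none
        | none => none
    else pvLoopA d eps n (index + 1) rest

-- the tail of A after name_obj is built: sort the int keys, then the indexed scan
def pvSelectA (name_obj : PySem.Dict String (Option String)) (episode_number : Int) : Option String :=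
  -- int(ep) on the numeric-literal keys never raises; .getD 0 is unreachable
  let episode_numbers := PySem.List.sorted (name_obj.keys.map (fun k => (PySem.Int.ofStr? k).getD 0)) (fun x => x) false
  pvLoopA name_obj episode_numbers episode_number 0 episode_numbers

def get_character_from_player (player : String) (episode_number : Int) : Option String :=
  pvSelectA (pvNameObjA player) episode_number

-- ===== PORT B =====
def pvCharacters : PySem.Dict String (PySem.Dict String (Option String)) :=
  PySem.Dict.ofList [
    ("Zander", PySem.Dict.ofList [("1", some "Emmett")]),
    ("Silas", PySem.Dict.ofList [("1", some "Laav"), ("13", some "KYL300")]),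
    ("Trey", PySem.Dict.ofList [("1", some "Garrick")]),
    ("Sean", PySem.Dict.ofList [("1", some "Seth")]),
    ("Brody", PySem.Dict.ofList [("1", some "Serpile"), ("5", some "Bail"), ("7", some "Ibraxas"), ("11", some "Sanya")]),
    ("Maxwell", PySem.Dict.ofList [("1", some "Matthias"), ("15", some "Matieu")]),
    ("Josh", PySem.Dict.ofList [("1", some "Jacob")]),
    ("Jonas", PySem.Dict.ofList [("1", some "Asier"), ("13", some "Chomsky")]),
    ("TheBlade", PySem.Dict.ofList [("1", some "Jim")]),
    ("Arky", PySem.Dict.ofList [("1", some "Lucian")]),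
    ("Mica", PySem.Dict.ofList [("1", some "Maia")]),
    ("Tom Thompson", PySem.Dict.ofList [("1", some "Mickey Mouse's Ghost")]),
    ("Finna Steel Christmas", PySem.Dict.ofList [("1", some "Steely")]),
    ("Nick", PySem.Dict.ofList [("1", some "Lodas")]),
    ("Rashidi", PySem.Dict.ofList [("1", some "Danny")]),
    ("Lili", PySem.Dict.ofList [("1", some "Iris")]),
    ("Bill", PySem.Dict.ofList [("1", some "Hector")])]

-- the tail of B after name_obj is looked up: filtered max with min fallback
def pvSelectB (name_obj : PySem.Dict String (Option String)) (episode_number : Int) : Option String :=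
  let eps := name_obj.keys.map (fun k => (PySem.Int.ofStr? k).getD 0)
  let cands := eps.filter (fun e => e ≤ episode_number)
  let key := if cands.isEmpty then PySem.List.min? eps (fun x => x) else PySem.List.max? cands (fun x => x)
  match key with
  | some k => name_obj.getD (PySem.Int.toStr k) none
  | none => none

def get_character_from_player_alt (player : String) (episode_number : Int) : Option String :=
  pvSelectB (pvCharacters.getD player (PySem.Dict.ofList [("1", none)])) episode_number

-- ===== PRECONDITION & SPEC =====
def Spec_get_character_from_player (player : String) (episode_number : Int) (out : Option String) : Prop := out = get_character_from_player_alt player episode_number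
instance (player : String) (episode_number : Int) (out : Option String) : Decidable (Spec_get_character_from_player player episode_number out) := by unfold Spec_get_character_from_player; infer_instance

-- ===== CLAIM (what is proved, stated in full; the proofs are below) =====
def Claim_equal_get_character_from_player : Prop := ∀ (player : String) (episode_number : Int), Dom_get_character_from_player player episode_number → Spec_get_character_from_player player episode_number (get_character_from_player player episode_number)

-- ===== LEMMAS AND PROOFS =====

-- one lemma per key-set shape occurring in the match (values arbitrary)
lemma pvSel1 (v : Option String) (n : Int) :
    pvSelectA (PySem.Dict.ofList [("1", v)]) n = pvSelectB (PySem.Dict.ofList [("1", v)]) n := by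
  have hk : (PySem.Dict.ofList [("1", v)]).keys = ["1"] := rfl
  have hm : List.map (fun k => (PySem.Int.ofStr? k).getD 0) ["1"] = [(1:Int)] := by decide
  simp only [pvSelectA, pvSelectB, hk, hm]
  rw [show PySem.List.sorted [(1:Int)] (fun x => x) false = [1] by decide]
  by_cases hn1 : (1:Int) ≤ n <;>
    simp [pvLoopA, PySem.List.pyGet?, PySem.List.pyIdx?, PySem.List.min?, PySem.List.max?, hn1]

lemma pvSel13 (v w : Option String) (n : Int) :
    pvSelectA (PySem.Dict.ofList [("1", v), ("13", w)]) n = pvSelectB (PySem.Dict.ofList [("1", v), ("13", w)]) n := by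
  have hk : (PySem.Dict.ofList [("1", v), ("13", w)]).keys = ["1", "13"] := rfl
  have hm : List.map (fun k => (PySem.Int.ofStr? k).getD 0) ["1", "13"] = ([(1:Int), (13:Int)] : List Int) := by decide
  simp only [pvSelectA, pvSelectB, hk, hm]
  rw [show PySem.List.sorted ([(1:Int), (13:Int)] : List Int) (fun x => x) false = [(1:Int), (13:Int)] by decide]
  by_cases hn1 : (1:Int) ≤ n <;> by_cases hn13 : (13:Int) ≤ n <;>
    simp [pvLoopA, PySem.List.pyGet?, PySem.List.pyIdx?, PySem.List.min?, PySem.List.max?, hn1, hn13] <;>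
    split_ifs <;> simp_all <;> try omega

lemma pvSel15 (v w : Option String) (n : Int) :
    pvSelectA (PySem.Dict.ofList [("1", v), ("15", w)]) n = pvSelectB (PySem.Dict.ofList [("1", v), ("15", w)]) n := by
  have hk : (PySem.Dict.ofList [("1", v), ("15", w)]).keys = ["1", "15"] := rfl
  have hm : List.map (fun k => (PySem.Int.ofStr? k).getD 0) ["1", "15"] = ([(1:Int), (15:Int)] : List Int) := by decide
  simp only [pvSelectA, pvSelectB, hk, hm]
  rw [show PySem.List.sorted ([(1:Int), (15:Int)] : List Int) (fun x => x) false = [(1:Int), (15:Int)] by decide]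
  by_cases hn1 : (1:Int) ≤ n <;> by_cases hn15 : (15:Int) ≤ n <;>
    simp [pvLoopA, PySem.List.pyGet?, PySem.List.pyIdx?, PySem.List.min?, PySem.List.max?, hn1, hn15] <;>
    split_ifs <;> simp_all <;> try omega

set_option maxHeartbeats 4000000 in
lemma pvSel4 (v w x y : Option String) (n : Int) :
    pvSelectA (PySem.Dict.ofList [("1", v), ("5", w), ("7", x), ("11", y)]) n
      = pvSelectB (PySem.Dict.ofList [("1", v), ("5", w), ("7", x), ("11", y)]) n := by
  have hk : (PySem.Dict.ofList [("1", v), ("5", w), ("7", x), ("11", y)]).keys = ["1", "5", "7", "11"] := rfl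
  have hm : List.map (fun k => (PySem.Int.ofStr? k).getD 0) ["1", "5", "7", "11"] = ([(1:Int), (5:Int), (7:Int), (11:Int)] : List Int) := by decide
  simp only [pvSelectA, pvSelectB, hk, hm]
  rw [show PySem.List.sorted ([(1:Int), (5:Int), (7:Int), (11:Int)] : List Int) (fun x => x) false = [(1:Int), (5:Int), (7:Int), (11:Int)] by decide]
  by_cases hn1 : (1:Int) ≤ n <;> by_cases hn5 : (5:Int) ≤ n <;> by_cases hn7 : (7:Int) ≤ n <;> by_cases hn11 : (11:Int) ≤ n <;>
    simp [pvLoopA, PySem.List.pyGet?, PySem.List.pyIdx?, PySem.List.min?, PySem.List.max?, hn1, hn5, hn7, hn11] <;>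
    split_ifs <;> simp_all <;> try omega

-- ===== VERDICT (by name: the statement is the Claim_ definition above) =====
set_option maxHeartbeats 2000000 in
theorem get_character_from_player_spec : Claim_equal_get_character_from_player := by
  intro player n _
  show pvSelectA (pvNameObjA player) n
    = pvSelectB (pvCharacters.getD player (PySem.Dict.ofList [("1", none)])) n
  by_cases h1 : player = "Zander"
  · subst h1; exact pvSel1 _ n
  by_cases h2 : player = "Silas"
  · subst h2; exact pvSel13 _ _ n
  by_cases h3 : player = "Trey"
  · subst h3; exact pvSel1 _ n
  by_cases h4 : player = "Sean"
  · subst h4; exact pvSel1 _ n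
  by_cases h5 : player = "Brody"
  · subst h5; exact pvSel4 _ _ _ _ n
  by_cases h6 : player = "Maxwell"
  · subst h6; exact pvSel15 _ _ n
  by_cases h7 : player = "Josh"
  · subst h7; exact pvSel1 _ n
  by_cases h8 : player = "Jonas"
  · subst h8; exact pvSel13 _ _ n
  by_cases h9 : player = "TheBlade"
  · subst h9; exact pvSel1 _ n
  by_cases h10 : player = "Arky"
  · subst h10; exact pvSel1 _ n
  by_cases h11 : player = "Mica"
  · subst h11; exact pvSel1 _ n
  by_cases h12 : player = "Tom Thompson"
  · subst h12; exact pvSel1 _ n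
  by_cases h13 : player = "Finna Steel Christmas"
  · subst h13; exact pvSel1 _ n
  by_cases h14 : player = "Nick"
  · subst h14; exact pvSel1 _ n
  by_cases h15 : player = "Rashidi"
  · subst h15; exact pvSel1 _ n
  by_cases h16 : player = "Lili"
  · subst h16; exact pvSel1 _ n
  by_cases h17 : player = "Bill"
  · subst h17; exact pvSel1 _ n
  have hA : pvNameObjA player = PySem.Dict.ofList [("1", none)] := by
    unfold pvNameObjA
    simp [h1, h2, h3, h4, h5, h6, h7, h8, h9, h10, h11, h12, h13, h14, h15, h16, h17]
  have hc : pvCharacters.contains player = false := by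
    rw [PySem.Dict.contains_eq_decide_mem_keys]
    rw [show pvCharacters.keys = ["Zander", "Silas", "Trey", "Sean", "Brody", "Maxwell", "Josh", "Jonas", "TheBlade", "Arky", "Mica", "Tom Thompson", "Finna Steel Christmas", "Nick", "Rashidi", "Lili", "Bill"] by decide]
    simp [h1, h2, h3, h4, h5, h6, h7, h8, h9, h10, h11, h12, h13, h14, h15, h16, h17]
  have hB : pvCharacters.getD player (PySem.Dict.ofList [("1", none)]) = PySem.Dict.ofList [("1", none)] := by
    simp [PySem.Dict.getD_of_not_contains, hc]
  rw [hA, hB]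
  exact pvSel1 none n
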